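-- pv_equiv track=rewrite | github.com/SteveDidero/Python_Projects | Simplecodes.py | challenge_6
-- ===== SOURCE A (Python) =====
-- def challenge_6(slist = [[1,2,3,4], [2,1,4,3], [4,1,3,2]]):
--     """
--     This function takes a  matrix list of n interger and check if every level of the metrix contain same range interger in ordered.
--     """
--
--     lenght = len(slist[0])
--     l_sort = sorted(slist[0])
--
--     s_set = set()
--
--
--     for i in slist:
--         for j in i:
--             s_set.add(j)
--
--     s_set = sorted(s_set)
--     if (lenght == len(s_set)) and (l_sort == s_set):
--         return True
--     else:
--         return False
-- ===== SOURCE B (Python) =====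
-- def challenge_6(slist = [[1,2,3,4], [2,1,4,3], [4,1,3,2]]):
--     target = set(slist[0])
--     if len(target) != len(slist[0]):
--         return False
--     return all(x in target for row in slist for x in row)
-- ===== Notes on version B (the rewrite author's own statement) =====
-- stated objective: simpler
-- what changed: B drops A's sort-everything-and-compare-sorted-lists structure: it guards first-row distinctness via len(set(row0)) and then does one membership pass checking every matrix element against the first row's value set, with no sorting and no accumulation set over the whole matrix.
import Mathlib
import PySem

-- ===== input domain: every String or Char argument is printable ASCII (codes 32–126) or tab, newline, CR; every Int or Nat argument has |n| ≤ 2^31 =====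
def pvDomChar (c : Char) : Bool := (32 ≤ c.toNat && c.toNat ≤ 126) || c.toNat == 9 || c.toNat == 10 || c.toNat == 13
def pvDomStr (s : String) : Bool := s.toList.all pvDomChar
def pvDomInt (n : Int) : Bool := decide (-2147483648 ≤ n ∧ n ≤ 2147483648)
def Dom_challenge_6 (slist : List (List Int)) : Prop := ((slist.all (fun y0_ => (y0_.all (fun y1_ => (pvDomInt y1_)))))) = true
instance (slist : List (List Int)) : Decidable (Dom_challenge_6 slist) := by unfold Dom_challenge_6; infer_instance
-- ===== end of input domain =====

-- B replaces A's collect-all-into-a-set / sort-both / compare-sorted-lists structure by a direct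
-- distinctness guard on the first row plus one membership pass of every element against the first
-- row's value set — no sorting at all (objective: simpler).

-- ===== PORT A =====
def challenge_6 (slist : List (List Int)) : Bool :=
  -- slist[0]: Pre_ excludes slist = [], where Python raises IndexError
  let first := (PySem.List.pyGet? slist 0).getD []
  let lenght := first.length
  let l_sort := PySem.List.sorted first (fun x => x) false
  let s_set : PySem.Set Int :=
    slist.foldl (fun s_set i => i.foldl (fun s_set j => PySem.Set.add s_set j) s_set) PySem.Set.empty
  let s_sorted := PySem.List.sorted s_set (fun x => x) false
  if lenght = s_sorted.length ∧ l_sort = s_sorted then true else false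

-- ===== PORT B =====
def challenge_6_alt (slist : List (List Int)) : Bool :=
  -- slist[0]: Pre_ excludes slist = [], where Python raises IndexError
  let first := (PySem.List.pyGet? slist 0).getD []
  let target := PySem.Set.ofList first
  if target.length ≠ first.length then false
  else slist.all (fun row => row.all (fun x => PySem.Set.contains target x))

-- ===== PRECONDITION & SPEC =====
-- Pre_ excludes only the empty matrix, on which Python A raises IndexError at slist[0].
def Pre_challenge_6 (slist : List (List Int)) : Prop := slist ≠ []
instance (slist : List (List Int)) : Decidable (Pre_challenge_6 slist) := by unfold Pre_challenge_6; infer_instance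
def pvWitness_challenge_6 : List (List Int) := [[1, 2], [2, 1]]

def Spec_challenge_6 (slist : List (List Int)) (out : Bool) : Prop := out = challenge_6_alt slist
instance (slist : List (List Int)) (out : Bool) : Decidable (Spec_challenge_6 slist out) := by unfold Spec_challenge_6; infer_instance

-- ===== CLAIM (what is proved, stated in full; the proofs are below) =====
def Claim_equal_challenge_6 : Prop := ∀ (slist : List (List Int)), Dom_challenge_6 slist → Pre_challenge_6 slist → Spec_challenge_6 slist (challenge_6 slist)

-- ===== LEMMAS AND PROOFS =====

-- set(xs), as a list, is a sublist of xs (it keeps first occurrences in order).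
theorem ofList_sublist (xs : List Int) : List.Sublist (PySem.Set.ofList xs) xs := by
  induction xs with
  | nil => simp [PySem.Set.ofList_nil]
  | cons x t ih =>
    rw [PySem.Set.ofList_cons]
    refine List.Sublist.cons₂ x (List.Sublist.trans ?_ ih)
    simp [PySem.Set.discard]

-- len(set(xs)) == len(xs) forces xs duplicate-free.
theorem nodup_of_ofList_length (xs : List Int)
    (hl : (PySem.Set.ofList xs).length = xs.length) : xs.Nodup := by
  have := (ofList_sublist xs).eq_of_length hl
  rw [← this]; exact PySem.Set.nodup_ofList xs

theorem main_eq (h : List Int) (t : List (List Int)) :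
    challenge_6 (h :: t) = challenge_6_alt (h :: t) := by
  have hget : (PySem.List.pyGet? (h :: t) 0).getD [] = h := by
    simp [PySem.List.pyGet?, PySem.List.pyIdx?]
  have hfold : (h :: t).foldl (fun s i => i.foldl (fun s j => PySem.Set.add s j) s) PySem.Set.empty
      = PySem.Set.ofList ((h :: t).flatten) := List.foldl_flatten.symm
  unfold challenge_6 challenge_6_alt
  simp only [hget, hfold]
  set F := PySem.Set.ofList ((h :: t).flatten) with hF
  set S := PySem.List.sorted F (fun x => x) false with hS
  by_cases hn : (PySem.Set.ofList h).length = h.length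
  · -- first row distinct: B runs the membership pass
    have hnd : h.Nodup := nodup_of_ofList_length h hn
    have hofh : PySem.Set.ofList h = h := PySem.Set.ofList_eq_self_of_nodup h hnd
    rw [if_neg (show ¬ (PySem.Set.ofList h).length ≠ h.length from fun hc => hc hn)]
    simp only [hofh]
    have hmemF : ∀ x, x ∈ F ↔ x ∈ (h :: t).flatten := fun x => PySem.Set.mem_ofList _ _
    by_cases hall : ∀ row ∈ h :: t, ∀ x ∈ row, x ∈ h
    · -- every element in the first row ⇒ F ~ h ⇒ A's sorted comparison succeeds
      have hsub : ∀ x ∈ (h :: t).flatten, x ∈ h := by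
        intro x hx
        obtain ⟨row, hr, hxr⟩ := List.mem_flatten.mp hx
        exact hall row hr x hxr
      have hsup : ∀ x ∈ h, x ∈ (h :: t).flatten :=
        fun x hx => List.mem_flatten.mpr ⟨h, List.mem_cons_self, hx⟩
      have hperm : F.Perm h := by
        refine (List.perm_ext_iff_of_nodup (PySem.Set.nodup_ofList _) hnd).mpr ?_
        intro x
        rw [hmemF]
        exact ⟨hsub x, hsup x⟩
      have hsorted : PySem.List.sorted h (fun x => x) false = S := by
        rw [hS]
        exact PySem.List.sorted_eq_sorted_of_perm h F (fun x => x)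
          (fun a b hab => hab) hperm.symm
      have hlen : h.length = S.length := by
        rw [hS, PySem.List.length_sorted]
        exact hperm.length_eq.symm
      rw [if_pos ⟨hlen, hsorted⟩, Eq.comm]
      simp only [List.all_eq_true]
      intro row hr x hx
      exact (PySem.Set.contains_iff h x).mpr (hall row hr x hx)
    · -- some element outside the first row ⇒ both sides are False
      have hA : ¬ (h.length = S.length ∧ PySem.List.sorted h (fun x => x) false = S) := by
        rintro ⟨hlen, hsorted⟩
        apply hall
        intro row hr x hx
        have hxF : x ∈ F := (hmemF x).mpr (List.mem_flatten.mpr ⟨row, hr, hx⟩)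
        have hxS : x ∈ S := by
          rw [hS]; exact (PySem.List.mem_sorted _ _ _ _).mpr hxF
        rw [← hsorted] at hxS
        exact (PySem.List.mem_sorted _ _ _ _).mp hxS
      rw [if_neg hA, Eq.comm]
      push Not at hall
      obtain ⟨row, hr, x, hx, hxh⟩ := hall
      refine List.all_eq_false.mpr ⟨row, hr, ?_⟩
      simp only [List.all_eq_true, not_forall]
      exact ⟨x, hx, fun hc => hxh ((PySem.Set.contains_iff h x).mp hc)⟩
  · -- first row has duplicates: B's guard fires; A's sorted comparison must fail too
    have hA : ¬ (h.length = S.length ∧ PySem.List.sorted h (fun x => x) false = S) := by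
      rintro ⟨hlen, hsorted⟩
      have hperm : h.Perm F := by
        have h1 : h.Perm (PySem.List.sorted h (fun x => x) false) :=
          (PySem.List.sorted_perm h (fun x => x) false).symm
        rw [hsorted, hS] at h1
        exact h1.trans (PySem.List.sorted_perm F (fun x => x) false)
      have hnd : h.Nodup := hperm.nodup_iff.mpr (PySem.Set.nodup_ofList _)
      exact hn (by rw [PySem.Set.ofList_eq_self_of_nodup h hnd])
    rw [if_pos (show (PySem.Set.ofList h).length ≠ h.length from hn), if_neg hA]

-- ===== VERDICT (by name: the statement is the Claim_ definition above) =====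
theorem challenge_6_spec : Claim_equal_challenge_6 := by
  intro slist _ hpre
  unfold Spec_challenge_6
  match slist with
  | [] => exact absurd rfl hpre
  | h :: t => exact main_eq h t
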